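-- pv_equiv track=rewrite | github.com/graheetphartyal23/sentinelops-rl | detection/cheat_detector.py | _detect_early_submit
-- ===== SOURCE A (Python) =====
-- from typing import Any
--
-- def _detect_early_submit(trajectory: list[dict[str, Any]]) -> bool:
--     submit_idx = next((idx for idx, item in enumerate(trajectory) if item["action"] == "submit"), None)
--     if submit_idx is None:
--         return False
--     if submit_idx <= 1:
--         return True
--     used_reasonable_actions = any(
--         item["action"] in {"read_data", "analyze", "write_data"} for item in trajectory[:submit_idx]
--     )
--     return not used_reasonable_actions
-- ===== SOURCE B (Python) =====
-- def _detect_early_submit(trajectory: list) -> bool: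
--     seen_reasonable = False
--     for idx, item in enumerate(trajectory):
--         action = item["action"]
--         if action == "submit":
--             return True if idx <= 1 else not seen_reasonable
--         if action in ("read_data", "analyze", "write_data"):
--             seen_reasonable = True
--     return False
-- ===== Notes on version B (the rewrite author's own statement) =====
-- stated objective: simpler
-- what changed: Replaces the find-first-submit scan followed by a second any() scan over the prefix with a single pass that maintains a seen_reasonable flag and decides at the first submit.
import Mathlib
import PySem

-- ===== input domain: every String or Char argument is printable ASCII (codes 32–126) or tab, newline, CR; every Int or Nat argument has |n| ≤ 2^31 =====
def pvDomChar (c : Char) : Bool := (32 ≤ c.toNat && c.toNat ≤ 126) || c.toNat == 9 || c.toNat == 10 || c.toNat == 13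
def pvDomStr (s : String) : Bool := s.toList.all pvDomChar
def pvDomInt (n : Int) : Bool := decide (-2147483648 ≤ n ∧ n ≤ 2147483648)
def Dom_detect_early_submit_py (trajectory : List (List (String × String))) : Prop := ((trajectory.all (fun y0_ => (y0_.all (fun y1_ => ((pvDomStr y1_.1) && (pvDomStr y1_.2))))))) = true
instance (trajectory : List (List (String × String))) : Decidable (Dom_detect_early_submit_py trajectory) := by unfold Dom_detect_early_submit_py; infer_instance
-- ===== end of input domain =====

-- B merges A's find-first-submit pass and the second any() pass over the prefix into one
-- loop carrying a seen_reasonable flag (same return value; 'simpler' objective, no speed claim).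

-- item["action"]: first-match association-list lookup (Python dict lookup; none = KeyError,
-- excluded by Pre_). Shared primitive of both ports.
def pvAction (item : List (String × String)) : Option String :=
  (item.find? (fun p => p.1 == "action")).map (·.2)

-- ===== PORT A =====
-- next((idx for idx, item in enumerate(trajectory) if item["action"] == "submit"), None)
def pvFindSubmit : List (List (String × String)) → Nat → Option Nat
  | [], _ => none
  | item :: rest, idx =>
      if (pvAction item).getD "" = "submit" then some idx else pvFindSubmit rest (idx + 1)

-- any(item["action"] in {...} for item in prefix)
def pvAnyReasonable (prefix_ : List (List (String × String))) : Bool :=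
  prefix_.any (fun item =>
    (pvAction item).getD "" = "read_data" ∨ (pvAction item).getD "" = "analyze" ∨
      (pvAction item).getD "" = "write_data")

def detect_early_submit_py (trajectory : List (List (String × String))) : Bool :=
  match pvFindSubmit trajectory 0 with
  | none => false
  | some submit_idx =>
      if submit_idx ≤ 1 then true
      else ! pvAnyReasonable (trajectory.take submit_idx)

-- ===== PORT B =====
-- single pass, carrying the index and the seen_reasonable flag
def pvBLoop : List (List (String × String)) → Nat → Bool → Bool
  | [], _, _ => false
  | item :: rest, idx, seen =>
      let a := (pvAction item).getD ""
      if a = "submit" then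
        (if idx ≤ 1 then true else ! seen)
      else
        pvBLoop rest (idx + 1)
          (seen || (a = "read_data" ∨ a = "analyze" ∨ a = "write_data"))

def detect_early_submit_py_alt (trajectory : List (List (String × String))) : Bool :=
  pvBLoop trajectory 0 false

-- ===== PRECONDITION & SPEC =====
-- Pre_ excludes exactly the inputs on which Python raises KeyError: some item that the scan
-- reaches (i.e. no earlier item has action "submit") lacks the "action" key.
def Pre_detect_early_submit_py (trajectory : List (List (String × String))) : Prop :=
  ∀ i : Fin trajectory.length,
    (∀ j : Fin trajectory.length, j.val < i.val → pvAction trajectory[j] ≠ some "submit") →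
    (pvAction trajectory[i]).isSome
instance (trajectory : List (List (String × String))) : Decidable (Pre_detect_early_submit_py trajectory) := by unfold Pre_detect_early_submit_py; infer_instance
def pvWitness_detect_early_submit_py : (List (List (String × String))) :=
  [[("action", "read_data")], [("action", "submit")]]

def Spec_detect_early_submit_py (trajectory : List (List (String × String))) (out : Bool) : Prop := out = detect_early_submit_py_alt trajectory
instance (trajectory : List (List (String × String))) (out : Bool) : Decidable (Spec_detect_early_submit_py trajectory out) := by unfold Spec_detect_early_submit_py; infer_instance

-- ===== CLAIM (what is proved, stated in full; the proofs are below) =====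
def Claim_equal_detect_early_submit_py : Prop := ∀ (trajectory : List (List (String × String))), Dom_detect_early_submit_py trajectory → Pre_detect_early_submit_py trajectory → Spec_detect_early_submit_py trajectory (detect_early_submit_py trajectory)

-- ===== LEMMAS AND PROOFS =====

theorem pvFindSubmit_ge (t : List (List (String × String))) (idx i : Nat)
    (h : pvFindSubmit t idx = some i) : idx ≤ i := by
  induction t generalizing idx with
  | nil => simp [pvFindSubmit] at h
  | cons item rest ih =>
      simp only [pvFindSubmit] at h
      split at h
      · simp only [Option.some.injEq] at h; omega
      · have := ih (idx + 1) h; omega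

-- invariant of B's loop, in terms of A's two passes
theorem pvBLoop_eq (t : List (List (String × String))) (idx : Nat) (seen : Bool) :
    pvBLoop t idx seen =
      match pvFindSubmit t idx with
      | none => false
      | some i => if i ≤ 1 then true else ! (seen || pvAnyReasonable (t.take (i - idx))) := by
  induction t generalizing idx seen with
  | nil => simp [pvBLoop, pvFindSubmit]
  | cons item rest ih =>
      simp only [pvBLoop, pvFindSubmit]
      by_cases hs : (pvAction item).getD "" = "submit"
      · simp [hs, pvAnyReasonable]
      · simp only [hs, ite_false]
        rw [ih]
        cases hf : pvFindSubmit rest (idx + 1) with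
        | none => simp
        | some i =>
            have hge := pvFindSubmit_ge rest (idx + 1) i hf
            simp only []
            by_cases hi : i ≤ 1
            · simp [hi]
            · have htake : i - idx = (i - (idx + 1)) + 1 := by omega
              simp only [hi, if_false, htake, List.take_succ_cons]
              simp [pvAnyReasonable, Bool.or_assoc]

theorem detect_early_submit_py_spec : Claim_equal_detect_early_submit_py := by
  intro trajectory _ _
  show detect_early_submit_py trajectory = detect_early_submit_py_alt trajectory
  unfold detect_early_submit_py detect_early_submit_py_alt
  rw [pvBLoop_eq]
  cases h : pvFindSubmit trajectory 0 with
  | none => rfl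
  | some i => simp
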